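-- pv_equiv track=rewrite | github.com/MrBrantCode/unitest_baseline | mut_generate/mist_train_cf/cf_67391/solution.py | quantum_entanglement
-- ===== SOURCE A (Python) =====
-- def quantum_entanglement(particle_states):
--     entangled_states = {}
--
--     # Iterate over each particle state in the input list
--     for i, state in enumerate(particle_states):
--         # Initialize a dictionary to store the entangled state and its effects
--         entangled_state = {}
--
--         # Simulate the instantaneous impact of state changes on entangled particles
--         for j, other_state in enumerate(particle_states):
--             if i != j:
--                 entangled_state[f'Particle {j+1}'] = other_state
--
--         # Store the entangled state and its effects in the result dictionary
--         entangled_states[f'Particle {i+1}'] = entangled_state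
--
--     return entangled_states
-- ===== SOURCE B (Python) =====
-- def quantum_entanglement(particle_states):
--     labels = [f'Particle {k}' for k in range(1, len(particle_states) + 1)]
--     before = {}
--     after = dict(zip(labels, particle_states))
--     result = {}
--     for label, state in zip(labels, particle_states):
--         del after[label]
--         result[label] = {**before, **after}
--         before[label] = state
--     return result
-- ===== Notes on version B (the rewrite author's own statement) =====
-- stated objective: alternative
-- what changed: B replaces A's per-particle rescan with an i != j test by a single forward sweep maintaining two evolving accumulator dicts (before = particles already passed, after = particles still ahead): each row is the merge {**before, **after} after deleting the current label from after, in the style of prefix/suffix-product algorithms.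
import Mathlib
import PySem

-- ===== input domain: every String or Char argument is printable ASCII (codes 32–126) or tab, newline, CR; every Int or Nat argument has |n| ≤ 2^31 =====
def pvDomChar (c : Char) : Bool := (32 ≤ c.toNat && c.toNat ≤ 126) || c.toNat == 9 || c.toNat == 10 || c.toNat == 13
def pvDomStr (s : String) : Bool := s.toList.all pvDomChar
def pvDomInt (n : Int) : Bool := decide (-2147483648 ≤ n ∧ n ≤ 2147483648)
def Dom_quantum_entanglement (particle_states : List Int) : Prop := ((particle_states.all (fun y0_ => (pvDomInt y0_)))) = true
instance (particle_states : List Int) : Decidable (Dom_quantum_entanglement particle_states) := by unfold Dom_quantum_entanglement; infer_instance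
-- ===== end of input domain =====

-- B replaces A's per-particle rescan with an i != j test by one forward sweep that maintains two
-- evolving accumulator dicts (before / after) and emits each row as their merge (objective: alternative).

-- ===== PORT A =====
-- label helper shared by both ports: Python's f'Particle {k}'
def pvLabel (k : Int) : String := "Particle " ++ PySem.Int.toStr k

def quantum_entanglement (particle_states : List Int) : List (String × List (String × Int)) :=
  ((PySem.List.enumerate particle_states).foldl (fun es iq =>
      es.insert (pvLabel (iq.1 + 1))
        (((PySem.List.enumerate particle_states).foldl (fun en jq =>
            if iq.1 ≠ jq.1 then en.insert (pvLabel (jq.1 + 1)) jq.2 else en)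
          (PySem.Dict.empty : PySem.Dict String Int)).items))
    (PySem.Dict.empty : PySem.Dict String (List (String × Int)))).items

-- ===== PORT B =====
-- Source B: labels once, after = dict(zip(labels, states)), then one pass:
--   del after[label]; result[label] = {**before, **after}; before[label] = state.
-- '{**before, **after}' is ported as before.update after.items (dict-merge semantics).
def quantum_entanglement_alt (particle_states : List Int) : List (String × List (String × Int)) :=
  let labels := (PySem.List.pyRange 1 (PySem.List.len particle_states + 1)).map (fun k => pvLabel k)
  let pairs := labels.zip particle_states
  let fin := pairs.foldl (fun st lp =>
      let after := st.2.1.erase lp.1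
      let result := st.2.2.insert lp.1 ((st.1.update after.items).items)
      (st.1.insert lp.1 lp.2, after, result))
    ((PySem.Dict.empty : PySem.Dict String Int),
     PySem.Dict.ofList pairs,
     (PySem.Dict.empty : PySem.Dict String (List (String × Int))))
  fin.2.2.items

-- ===== PRECONDITION & SPEC =====
def Spec_quantum_entanglement (particle_states : List Int) (out : List (String × List (String × Int))) : Prop := out = quantum_entanglement_alt particle_states
instance (particle_states : List Int) (out : List (String × List (String × Int))) : Decidable (Spec_quantum_entanglement particle_states out) := by unfold Spec_quantum_entanglement; infer_instance

-- ===== CLAIM (what is proved, stated in full; the proofs are below) =====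
def Claim_equal_quantum_entanglement : Prop := ∀ (particle_states : List Int), Dom_quantum_entanglement particle_states → Spec_quantum_entanglement particle_states (quantum_entanglement particle_states)

-- ===== LEMMAS AND PROOFS =====

-- decimal digit characters are distinct
theorem pv_digitChar_inj {a b : Nat} (ha : a < 10) (hb : b < 10)
    (h : Nat.digitChar a = Nat.digitChar b) : a = b := by
  interval_cases a <;> interval_cases b <;> simp_all [Nat.digitChar]

-- Nat.toDigits 10 is injective
theorem pv_toDigits10_inj : ∀ (m n : Nat), Nat.toDigits 10 m = Nat.toDigits 10 n → m = n := by
  intro m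
  induction m using Nat.strong_induction_on with
  | _ m ih =>
    intro n h
    by_cases hm : m < 10 <;> by_cases hn : n < 10
    · rw [Nat.toDigits_of_lt_base hm, Nat.toDigits_of_lt_base hn] at h
      simp only [List.cons.injEq, and_true] at h
      exact pv_digitChar_inj hm hn h
    · exfalso
      rw [Nat.toDigits_of_lt_base hm,
          Nat.toDigits_of_base_le (n := n) (by omega) (by omega)] at h
      have hlen := congrArg List.length h
      have hp := @Nat.length_toDigits_pos 10 (n / 10)
      simp only [List.length_cons, List.length_nil, List.length_append] at hlen
      omega
    · exfalso
      rw [Nat.toDigits_of_base_le (n := m) (by omega) (by omega),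
          Nat.toDigits_of_lt_base hn] at h
      have hlen := congrArg List.length h
      have hp := @Nat.length_toDigits_pos 10 (m / 10)
      simp only [List.length_cons, List.length_nil, List.length_append] at hlen
      omega
    · rw [Nat.toDigits_of_base_le (n := m) (by omega) (by omega),
          Nat.toDigits_of_base_le (n := n) (by omega) (by omega)] at h
      have h2 := List.append_inj' h (by simp)
      have hdiv : m / 10 = n / 10 :=
        ih (m / 10) (by omega) _ h2.1
      have hmod : m % 10 = n % 10 :=
        pv_digitChar_inj (Nat.mod_lt _ (by omega)) (Nat.mod_lt _ (by omega))
          (by have := h2.2; simpa using this)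
      omega

-- pvLabel is injective on positive arguments
theorem pv_label_inj {m n : Int} (hm : 0 < m) (hn : 0 < n) (h : pvLabel m = pvLabel n) : m = n := by
  have h' : (pvLabel m).toList = (pvLabel n).toList := by rw [h]
  simp only [pvLabel, PySem.Int.toStr] at h'
  rw [String.toList_append, String.toList_append] at h'
  have h2 : (String.ofList (PySem.Int.toChars m)).toList
      = (String.ofList (PySem.Int.toChars n)).toList := by
    exact List.append_cancel_left h'
  simp only [String.toList_ofList] at h2
  simp only [PySem.Int.toChars, if_neg (by omega : ¬ m < 0), if_neg (by omega : ¬ n < 0)] at h2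
  have := pv_toDigits10_inj m.toNat n.toNat h2
  omega

-- filtering index s+k out of enumerate xs s is take k ++ drop (k+1)
theorem pv_enum_filter_eq (xs : List Int) : ∀ (s : Int) (k : Nat),
    (PySem.List.enumerate xs s).filter (fun q => decide (s + (k : Int) ≠ q.1))
      = (PySem.List.enumerate xs s).take k ++ (PySem.List.enumerate xs s).drop (k + 1) := by
  induction xs with
  | nil => intro s k; simp [PySem.List.enumerate_nil]
  | cons x xs ih =>
    intro s k
    rw [PySem.List.enumerate_cons]
    cases k with
    | zero =>
      simp only [Nat.cast_zero, add_zero, List.filter_cons]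
      rw [if_neg (by simp)]
      simp only [List.take_zero, List.drop_succ_cons, List.drop_zero, List.nil_append]
      apply List.filter_eq_self.2
      intro q hq
      rcases (PySem.List.mem_enumerate_iff xs (s + 1) q).1 hq with ⟨j, hj, rfl⟩
      simp only [decide_eq_true_eq]
      omega
    | succ k =>
      simp only [List.filter_cons, List.take_succ_cons, List.drop_succ_cons]
      rw [if_pos (by simp only [decide_eq_true_eq]; push_cast; omega)]
      rw [List.cons_append]
      congr 1
      have := ih (s + 1) k
      rw [show s + ((k : Nat) + 1 : Nat) = (s + 1) + (k : Int) by push_cast; ring]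
      exact this

-- the zipped label/state table of B is the mapped enumeration of the input
theorem pv_pairs_eq (xs : List Int) : ∀ (a : Int),
    ((PySem.List.pyRange (a + 1) (a + 1 + xs.length)).map (fun k => pvLabel k)).zip xs
      = (PySem.List.enumerate xs a).map (fun q => (pvLabel (q.1 + 1), q.2)) := by
  induction xs with
  | nil => intro a; simp [PySem.List.enumerate_nil, PySem.List.pyRange]
  | cons x xs ih =>
    intro a
    simp only [List.length_cons, Nat.cast_add, Nat.cast_one]
    rw [PySem.List.pyRange_one_cons (by omega)]
    rw [PySem.List.enumerate_cons]
    simp only [List.map_cons, List.zip_cons_cons]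
    congr 1
    rw [show a + 1 + ((xs.length : Int) + 1) = (a + 1) + 1 + (xs.length : Int) by ring]
    exact ih (a + 1)

-- keys generated by the enumeration are pairwise distinct
theorem pv_keys_nodup (xs : List Int) :
    ((PySem.List.enumerate xs 0).map (fun q => pvLabel (q.1 + 1))).Nodup := by
  unfold List.Nodup
  rw [List.pairwise_map]
  refine (PySem.List.pairwise_lt_enumerate xs 0).imp_of_mem ?_
  intro p q hp hq hlt
  rcases (PySem.List.mem_enumerate_iff xs 0 p).1 hp with ⟨j, hj, rfl⟩
  rcases (PySem.List.mem_enumerate_iff xs 0 q).1 hq with ⟨j', hj', rfl⟩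
  intro h
  have heq := pv_label_inj (by simp only []; omega) (by simp only []; omega) h
  simp only [] at hlt
  omega

-- A's inner loop builds exactly the filtered association list
theorem pv_inner_eq (xs : List Int) (i : Int) :
    (((PySem.List.enumerate xs 0).foldl (fun en jq =>
        if i ≠ jq.1 then en.insert (pvLabel (jq.1 + 1)) jq.2 else en)
      (PySem.Dict.empty : PySem.Dict String Int)).items)
    = ((PySem.List.enumerate xs 0).filter (fun jq => decide (i ≠ jq.1))).map
        (fun jq => (pvLabel (jq.1 + 1), jq.2)) := by
  rw [show (fun (en : PySem.Dict String Int) (jq : Int × Int) =>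
        if i ≠ jq.1 then en.insert (pvLabel (jq.1 + 1)) jq.2 else en)
      = (fun (en : PySem.Dict String Int) (jq : Int × Int) =>
        if decide (i ≠ jq.1) = true then en.insert (pvLabel (jq.1 + 1)) jq.2 else en) from by
    funext en jq; simp]
  rw [← List.foldl_filter]
  have hmain := PySem.Dict.items_foldl_insert_fresh
      ((PySem.List.enumerate xs 0).filter (fun jq => decide (i ≠ jq.1)))
      (fun jq => pvLabel (jq.1 + 1)) (fun jq : Int × Int => jq.2)
      (PySem.Dict.empty : PySem.Dict String Int)
      (by intro a _; exact PySem.Dict.contains_empty _)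
      (by
        have hsub : ((PySem.List.enumerate xs 0).filter (fun jq => decide (i ≠ jq.1))).Sublist
            (PySem.List.enumerate xs 0) := List.filter_sublist
        exact (pv_keys_nodup xs).sublist (hsub.map _))
  simpa using hmain

-- characterisation of A: row i lists all pairs except index i
theorem pv_A_eq (ps : List Int) :
    quantum_entanglement ps = (PySem.List.enumerate ps 0).map
      (fun q => (pvLabel (q.1 + 1),
        ((PySem.List.enumerate ps 0).filter (fun jq => decide (q.1 ≠ jq.1))).map
          (fun jq => (pvLabel (jq.1 + 1), jq.2)))) := by
  unfold quantum_entanglement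
  have hmain := PySem.Dict.items_foldl_insert_fresh
      (PySem.List.enumerate ps 0)
      (fun iq => pvLabel (iq.1 + 1))
      (fun iq : Int × Int => (((PySem.List.enumerate ps 0).foldl (fun en jq =>
          if iq.1 ≠ jq.1 then en.insert (pvLabel (jq.1 + 1)) jq.2 else en)
        (PySem.Dict.empty : PySem.Dict String Int)).items))
      (PySem.Dict.empty : PySem.Dict String (List (String × Int)))
      (by intro a _; exact PySem.Dict.contains_empty _)
      (pv_keys_nodup ps)
  rw [hmain]
  simp only [pv_inner_eq]
  rfl

-- the rows that B's sweep emits, relative to an already-processed prefix acc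
def pvRows (acc : List (String × Int)) : List (String × Int) → List (String × List (String × Int))
  | [] => []
  | p :: t => (p.1, acc ++ t) :: pvRows (acc ++ [p]) t

-- a dict does not contain a key outside its key list
theorem pv_contains_false {κ ν : Type} [BEq κ] [LawfulBEq κ] (d : PySem.Dict κ ν) (k : κ)
    (h : k ∉ d.keys) : d.contains k = false := by
  cases h' : d.contains k
  · rfl
  · exact absurd ((PySem.Dict.contains_iff_mem_keys d k).1 h') h

-- merging a dict with fresh distinct pairs appends them
theorem pv_update_items {κ ν : Type} [BEq κ] [LawfulBEq κ] (d : PySem.Dict κ ν)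
    (l : List (κ × ν)) (hf : ∀ p ∈ l, d.contains p.1 = false) (hn : (l.map Prod.fst).Nodup) :
    (d.update l).items = d.items ++ l := by
  have hmain := PySem.Dict.items_foldl_insert_fresh l Prod.fst Prod.snd d
      (by intro a ha; exact hf a ha) hn
  simpa [PySem.Dict.update] using hmain

-- invariant of B's sweep: with before = bef, after = the remaining pairs l, the loop
-- appends to res exactly the rows pvRows bef.items l
theorem pv_B_loop (l : List (String × Int)) : ∀ (bef : PySem.Dict String Int)
    (res : PySem.Dict String (List (String × Int))),
    (bef.keys ++ l.map Prod.fst).Nodup →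
    (∀ k ∈ l.map Prod.fst, res.contains k = false) →
    res.keys.Nodup →
    (l.foldl (fun st lp =>
        let after := st.2.1.erase lp.1
        let result := st.2.2.insert lp.1 ((st.1.update after.items).items)
        (st.1.insert lp.1 lp.2, after, result))
      (bef, PySem.Dict.mk l, res)).2.2.items = res.items ++ pvRows bef.items l := by
  induction l with
  | nil => intro bef res _ _ _; simp [pvRows]
  | cons p t ih =>
    intro bef res h1 h2 h3
    rcases List.nodup_append.1 h1 with ⟨hb, hc, hdisj⟩
    have hpt : p.1 ∉ t.map Prod.fst := by
      simp only [List.map_cons, List.nodup_cons] at hc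
      exact hc.1
    have htn : (t.map Prod.fst).Nodup := by
      simp only [List.map_cons, List.nodup_cons] at hc
      exact hc.2
    have hbefp : bef.contains p.1 = false :=
      pv_contains_false bef p.1 (fun hm => hdisj p.1 hm p.1 (by simp) rfl)
    have hresp : res.contains p.1 = false := h2 p.1 (by simp)
    -- the state after the first iteration
    have hafter : ((PySem.Dict.mk (p :: t) : PySem.Dict String Int)).erase p.1
        = PySem.Dict.mk t := by
      apply PySem.Dict.ext
      simp only [PySem.Dict.erase, List.filter_cons]
      rw [if_neg (by simp)]
      apply List.filter_eq_self.2
      intro q hq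
      have : q.1 ≠ p.1 := by
        intro he; exact hpt (he ▸ List.mem_map_of_mem hq)
      simp [this]
    have hupd : (bef.update t).items = bef.items ++ t := by
      refine pv_update_items bef t ?_ htn
      intro q hq
      refine pv_contains_false bef q.1 (fun hm => hdisj q.1 hm q.1 ?_ rfl)
      simp only [List.map_cons, List.mem_cons]
      exact Or.inr (List.mem_map_of_mem hq)
    rw [List.foldl_cons]
    show ((t.foldl _ (bef.insert p.1 p.2,
        (PySem.Dict.mk (p :: t) : PySem.Dict String Int).erase p.1,
        res.insert p.1 ((bef.update ((PySem.Dict.mk (p :: t) :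
          PySem.Dict String Int).erase p.1).items).items))).2.2).items = _
    rw [hafter]
    have hstep := ih (bef.insert p.1 p.2)
        (res.insert p.1 ((bef.update (PySem.Dict.mk t : PySem.Dict String Int).items).items))
        (by
          rw [PySem.Dict.keys_insert_of_not_contains _ _ hbefp]
          have : bef.keys ++ [p.1] ++ t.map Prod.fst = bef.keys ++ p.1 :: t.map Prod.fst := by
            simp
          rw [this]
          simpa using h1)
        (by
          intro k hk
          rw [PySem.Dict.contains_insert]
          have hk1 : k ≠ p.1 := by
            intro he; exact hpt (he ▸ hk)
          simp [hk1, h2 k (by simp [hk])])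
        (PySem.Dict.nodup_keys_insert _ _ _ h3)
    rw [hstep]
    rw [PySem.Dict.items_insert_of_not_contains _ _ hresp]
    have hbi : (bef.insert p.1 p.2).items = bef.items ++ [p] := by
      rw [PySem.Dict.items_insert_of_not_contains _ _ hbefp]
    rw [hbi]
    show res.items ++ [(p.1, (bef.update (PySem.Dict.mk t : PySem.Dict String Int).items).items)]
        ++ pvRows (bef.items ++ [p]) t = res.items ++ pvRows bef.items (p :: t)
    have : (PySem.Dict.mk t : PySem.Dict String Int).items = t := rfl
    rw [this, hupd]
    simp [pvRows]

-- closed form of pvRows by index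
theorem pv_rows_spec : ∀ (L acc : List (String × Int)),
    pvRows acc L = (List.range L.length).map
      (fun k => ((L.getD k ("", 0)).1, acc ++ (L.take k ++ L.drop (k + 1)))) := by
  intro L
  induction L with
  | nil => intro acc; simp [pvRows]
  | cons p t ih =>
    intro acc
    simp only [pvRows, List.length_cons, List.range_succ_eq_map, List.map_cons, List.map_map]
    congr 1
    rw [ih (acc ++ [p])]
    apply List.map_congr_left
    intro k _
    simp only [Function.comp_apply, List.getD, List.getElem?_cons_succ,
      List.take_succ_cons, List.drop_succ_cons]
    rw [List.append_cons]
    simp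

-- an association list with distinct keys is its own dict
theorem pv_ofList_mk {v : Type} (l : List (String × v)) (hn : (l.map Prod.fst).Nodup) :
    (PySem.Dict.ofList l : PySem.Dict String v) = PySem.Dict.mk l := by
  have h := pv_update_items (PySem.Dict.empty : PySem.Dict String v) l
      (fun a _ => PySem.Dict.contains_empty _) hn
  apply PySem.Dict.ext
  exact h

-- B's sweep over any distinct-key table produces its rows
theorem pv_sweep (E : List (String × Int)) (h : (E.map Prod.fst).Nodup) :
    (E.foldl (fun st lp =>
        let after := st.2.1.erase lp.1
        let result := st.2.2.insert lp.1 ((st.1.update after.items).items)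
        (st.1.insert lp.1 lp.2, after, result))
      ((PySem.Dict.empty : PySem.Dict String Int),
       PySem.Dict.ofList E,
       (PySem.Dict.empty : PySem.Dict String (List (String × Int))))).2.2.items
      = pvRows [] E := by
  rw [pv_ofList_mk E h]
  have hloop := pv_B_loop E (PySem.Dict.empty : PySem.Dict String Int)
      (PySem.Dict.empty : PySem.Dict String (List (String × Int)))
      (by simpa [PySem.Dict.keys_empty] using h)
      (fun k _ => PySem.Dict.contains_empty _)
      (by simp [PySem.Dict.keys_empty])
  simpa using hloop

-- characterisation of B: the rows of the mapped enumeration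
theorem pv_B_eq (ps : List Int) :
    quantum_entanglement_alt ps
      = pvRows [] ((PySem.List.enumerate ps 0).map (fun q => (pvLabel (q.1 + 1), q.2))) := by
  simp only [quantum_entanglement_alt]
  have hpairs : ((PySem.List.pyRange 1 (PySem.List.len ps + 1)).map
        (fun k => pvLabel k)).zip ps
      = (PySem.List.enumerate ps 0).map (fun q => (pvLabel (q.1 + 1), q.2)) := by
    have := pv_pairs_eq ps 0
    simpa [PySem.List.len_eq, add_comm] using this
  rw [hpairs]
  refine pv_sweep _ ?_
  rw [List.map_map]
  simpa [Function.comp] using pv_keys_nodup ps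

theorem pv_main (particle_states : List Int) :
    quantum_entanglement particle_states = quantum_entanglement_alt particle_states := by
  rw [pv_A_eq, pv_B_eq, pv_rows_spec]
  apply List.ext_getElem
  · simp
  · intro k h1 h2
    simp only [List.getElem_map, List.getElem_range, PySem.List.getElem_enumerate, zero_add]
    have hk : k < ((PySem.List.enumerate particle_states 0).map
        (fun q => (pvLabel (q.1 + 1), q.2))).length := by
      simpa using h2
    refine Prod.ext ?_ ?_
    · rw [List.getD_eq_getElem _ _ hk]
      simp [PySem.List.getElem_enumerate]
    · show ((PySem.List.enumerate particle_states 0).filter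
          (fun jq => decide ((k : Int) ≠ jq.1))).map (fun jq => (pvLabel (jq.1 + 1), jq.2)) = _
      have hfe := pv_enum_filter_eq particle_states 0 k
      simp only [zero_add] at hfe
      rw [hfe]
      simp [List.map_take, List.map_drop]

-- ===== VERDICT (by name: the statement is the Claim_ definition above) =====
theorem quantum_entanglement_spec : Claim_equal_quantum_entanglement := by
  intro particle_states _
  unfold Spec_quantum_entanglement
  exact pv_main particle_states
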